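-- pv_equiv track=rewrite | github.com/lightbooster/HSE_tasks | IAD/taskW4.py | time_add
-- ===== SOURCE A (Python) =====
-- def time_add(t1, t2, max=60, len=3):
--     left = 0
--     add = 0
--     new_result = [0] * len
--     for i in range(len-1, -1, -1):
--         summa = t2[i] + t1[i] + add
--         left = summa % max
--         add = summa // max
--         if left == summa:
--             new_result[i] = summa
--             left = 0
--         else:
--             new_result[i] = left
--
--     return tuple(new_result)
-- ===== SOURCE B (Python) =====
-- def time_add(t1, t2, max=60, len=3):
--     # Encode both times as one integer in base `max`, add, then decode
--     # `len` digits bottom-up with divmod (the overflow carry simply remains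
--     # undecoded, matching the discarded top carry).
--     n = 0
--     for i in range(len):
--         n = n * max + t1[i] + t2[i]
--     digits = []
--     for _ in range(len):
--         n, d = divmod(n, max)
--         digits.append(d)
--     digits.reverse()
--     return tuple(digits)
-- ===== Notes on version B (the rewrite author's own statement) =====
-- stated objective: alternative
-- what changed: Replaces the right-to-left per-digit carry loop with an encode/add/decode decomposition: fold both tuples into one base-max integer, then extract len digits bottom-up with divmod (the discarded top carry is simply never decoded).
import Mathlib
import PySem

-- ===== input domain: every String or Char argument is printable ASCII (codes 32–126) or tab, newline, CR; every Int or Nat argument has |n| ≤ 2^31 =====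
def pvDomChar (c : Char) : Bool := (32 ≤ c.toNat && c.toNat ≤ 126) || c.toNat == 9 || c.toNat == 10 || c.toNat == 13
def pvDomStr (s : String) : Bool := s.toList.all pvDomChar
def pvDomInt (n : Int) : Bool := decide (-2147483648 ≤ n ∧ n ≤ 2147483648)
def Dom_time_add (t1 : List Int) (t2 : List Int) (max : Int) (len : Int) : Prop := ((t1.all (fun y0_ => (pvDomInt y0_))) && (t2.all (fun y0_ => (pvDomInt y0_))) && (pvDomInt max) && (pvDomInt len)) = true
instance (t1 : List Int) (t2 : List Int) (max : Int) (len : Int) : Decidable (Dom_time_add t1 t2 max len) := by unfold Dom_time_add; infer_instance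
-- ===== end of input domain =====

-- B replaces A's right-to-left carry loop with an encode-to-one-integer / add / decode-by-divmod decomposition (alternative algorithm, same cost).

-- ===== PORT A =====
def time_add (t1 : List Int) (t2 : List Int) (max : Int) (len : Int) : List Int :=
  -- left = 0; add = 0; new_result = [0] * len
  -- for i in range(len-1, -1, -1): …  (state = (left, add, new_result))
  let st := (PySem.List.pyRange (len - 1) (-1) (-1)).foldl
    (fun (st : Int × Int × List Int) i =>
      let summa := PySem.List.pyGetD t2 i 0 + PySem.List.pyGetD t1 i 0 + st.2.1
      let left := PySem.Int.mod summa max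
      let add := PySem.Int.floordiv summa max
      if left = summa then (0, add, PySem.List.pySetD st.2.2 i summa)
      else (left, add, PySem.List.pySetD st.2.2 i left))
    (0, 0, List.replicate len.toNat 0)
  st.2.2

-- ===== PORT B =====
def time_add_alt (t1 : List Int) (t2 : List Int) (max : Int) (len : Int) : List Int :=
  -- n = 0; for i in range(len): n = n*max + t1[i] + t2[i]
  let n := (PySem.List.pyRange 0 len 1).foldl
    (fun n i => n * max + PySem.List.pyGetD t1 i 0 + PySem.List.pyGetD t2 i 0) 0
  -- digits = []; for _ in range(len): n, d = divmod(n, max); digits.append(d)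
  let st := (PySem.List.pyRange 0 len 1).foldl
    (fun (st : Int × List Int) _ =>
      (PySem.Int.floordiv st.1 max, st.2 ++ [PySem.Int.mod st.1 max]))
    (n, [])
  -- digits.reverse(); return tuple(digits)
  st.2.reverse

-- ===== PRECONDITION & SPEC =====
-- Pre_ excludes exactly the inputs where A raises: for len ≥ 1 it needs max ≠ 0
-- (ZeroDivisionError) and both tuples to have at least len elements (IndexError).
def Pre_time_add (t1 : List Int) (t2 : List Int) (max : Int) (len : Int) : Prop :=
  1 ≤ len → (max ≠ 0 ∧ len ≤ (t1.length : Int) ∧ len ≤ (t2.length : Int))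
instance (t1 : List Int) (t2 : List Int) (max : Int) (len : Int) : Decidable (Pre_time_add t1 t2 max len) := by unfold Pre_time_add; infer_instance
def pvWitness_time_add : List Int × List Int × Int × Int := ([1, 2, 59], [4, 5, 6], 60, 3)
def Spec_time_add (t1 : List Int) (t2 : List Int) (max : Int) (len : Int) (out : List Int) : Prop := out = time_add_alt t1 t2 max len
instance (t1 : List Int) (t2 : List Int) (max : Int) (len : Int) (out : List Int) : Decidable (Spec_time_add t1 t2 max len out) := by unfold Spec_time_add; infer_instance

-- ===== CLAIM (what is proved, stated in full; the proofs are below) =====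
def Claim_equal_time_add : Prop := ∀ (t1 : List Int) (t2 : List Int) (max : Int) (len : Int), Dom_time_add t1 t2 max len → Pre_time_add t1 t2 max len → Spec_time_add t1 t2 max len (time_add t1 t2 max len)

-- ===== LEMMAS AND PROOFS =====

-- A's carry pass over a rightmost-first list of digit sums with carry-in `a`:
-- produces the digits least-significant first.
def revPass (max : Int) : List Int → Int → List Int
  | [], _ => []
  | x :: xs, a => PySem.Int.mod (x + a) max :: revPass max xs (PySem.Int.floordiv (x + a) max)

-- B's decode: extract k digits of n, least-significant first.
def extract (max : Int) : Nat → Int → List Int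
  | 0, _ => []
  | k + 1, n => PySem.Int.mod n max :: extract max k (PySem.Int.floordiv n max)

-- the digit-sum list of the first j indices, rightmost (index j-1) first
def sumsRev (t1 t2 : List Int) (j : Nat) : List Int :=
  ((List.range j).map
    (fun i : Nat => PySem.List.pyGetD t1 (i : Int) 0 + PySem.List.pyGetD t2 (i : Int) 0)).reverse

-- Floor-divmod of q*b + r by b.
theorem pv_fd_lem (q r b : Int) (h : b ≠ 0) : PySem.Int.floordiv (q*b + r) b = q + PySem.Int.floordiv r b := by
  simp only [PySem.Int.floordiv]
  rw [show q*b + r = r + b*q by ring, Int.add_mul_fdiv_left r q h, Int.add_comm]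

theorem pv_fm_lem (q r b : Int) (h : b ≠ 0) : PySem.Int.mod (q*b + r) b = PySem.Int.mod r b := by
  have := pv_fd_lem q r b h
  simp only [PySem.Int.floordiv] at this
  simp only [PySem.Int.mod, Int.fmod_def, this]
  ring

-- Decoding the base-`max` encoding of a rightmost-first digit-sum list (plus a
-- carry-in) digit by digit is exactly A's carry pass.
theorem pv_extract_encRev (max : Int) (h : max ≠ 0) (R : List Int) : ∀ (a : Int),
    extract max R.length (R.foldr (fun x n => n * max + x) 0 + a) = revPass max R a := by
  induction R with
  | nil => intro a; rfl
  | cons x R ih =>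
    intro a
    have hv : (x :: R).foldr (fun x n => n * max + x) 0 + a
        = (R.foldr (fun x n => n * max + x) 0) * max + (x + a) := by
      simp [List.foldr]; ring
    simp only [List.length_cons, extract, revPass, hv,
      pv_fd_lem _ (x + a) max h, pv_fm_lem _ (x + a) max h, ih]

-- B's decode loop accumulates `extract` digits.
theorem pv_decode_fold (max : Int) (l : List Int) : ∀ (m : Int) (acc : List Int),
    (l.foldl (fun (st : Int × List Int) _ =>
      (PySem.Int.floordiv st.1 max, st.2 ++ [PySem.Int.mod st.1 max])) (m, acc)).2
    = acc ++ extract max l.length m := by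
  induction l with
  | nil => intro m acc; simp [extract]
  | cons x l ih => intro m acc; simp [List.foldl, ih, extract]

-- A's remaining loop over indices j-1 … 0 writes revPass's digits into the
-- first j slots of the result list.
theorem pv_aloop (t1 t2 : List Int) (max : Int) :
    ∀ (j : Nat) (a left0 : Int) (nr : List Int), j ≤ nr.length →
    ((PySem.List.pyRange ((j : Int) - 1) (-1) (-1)).foldl
      (fun (st : Int × Int × List Int) i =>
        let summa := PySem.List.pyGetD t2 i 0 + PySem.List.pyGetD t1 i 0 + st.2.1
        let left := PySem.Int.mod summa max
        let add := PySem.Int.floordiv summa max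
        if left = summa then (0, add, PySem.List.pySetD st.2.2 i summa)
        else (left, add, PySem.List.pySetD st.2.2 i left)) (left0, a, nr)).2.2
    = (revPass max (sumsRev t1 t2 j) a).reverse ++ nr.drop j := by
  intro j
  induction j with
  | zero =>
    intro a left0 nr _
    rw [show ((0 : Nat) : Int) - 1 = -1 by norm_num,
      PySem.List.pyRange_neg_one_eq_nil (le_refl (-1))]
    simp [revPass, sumsRev]
  | succ j ih =>
    intro a left0 nr hlen
    have hcast : ((j + 1 : Nat) : Int) - 1 = (j : Int) := by push_cast; ring
    rw [hcast, PySem.List.pyRange_neg_one_cons (by omega)]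
    set summa := PySem.List.pyGetD t2 (j : Int) 0 + PySem.List.pyGetD t1 (j : Int) 0 + a with hsumma
    have hjlt : j < nr.length := by omega
    have hset : PySem.List.pySetD nr (j : Int) (PySem.Int.mod summa max)
        = nr.set j (PySem.Int.mod summa max) := PySem.List.pySetD_natCast nr j _
    -- the two branches write the same list and carry; the leftover `left`
    -- component is irrelevant (ih holds for every left0)
    have key : ∀ (l0 : Int),
        ((PySem.List.pyRange ((j : Int) - 1) (-1) (-1)).foldl
          (fun (st : Int × Int × List Int) i =>
            let summa := PySem.List.pyGetD t2 i 0 + PySem.List.pyGetD t1 i 0 + st.2.1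
            let left := PySem.Int.mod summa max
            let add := PySem.Int.floordiv summa max
            if left = summa then (0, add, PySem.List.pySetD st.2.2 i summa)
            else (left, add, PySem.List.pySetD st.2.2 i left))
          (l0, PySem.Int.floordiv summa max, nr.set j (PySem.Int.mod summa max))).2.2
        = (revPass max (sumsRev t1 t2 j) (PySem.Int.floordiv summa max)).reverse
          ++ (nr.set j (PySem.Int.mod summa max)).drop j := by
      intro l0
      exact ih (PySem.Int.floordiv summa max) l0 _ (by rw [List.length_set]; omega)
    have hdrop : (nr.set j (PySem.Int.mod summa max)).drop j
        = PySem.Int.mod summa max :: nr.drop (j + 1) := by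
      rw [List.drop_eq_getElem_cons (by simpa using hjlt), List.getElem_set_self,
        List.drop_set_of_lt]
      omega
    have hrhs : (revPass max (sumsRev t1 t2 (j + 1)) a).reverse
        = (revPass max (sumsRev t1 t2 j) (PySem.Int.floordiv summa max)).reverse
          ++ [PySem.Int.mod summa max] := by
      unfold sumsRev
      rw [List.range_succ, List.map_append, List.reverse_append]
      simp only [List.map_cons, List.map_nil, List.reverse_cons, List.reverse_nil,
        List.nil_append, List.singleton_append, revPass, List.reverse_cons]
      rw [show PySem.List.pyGetD t1 (j : Int) 0 + PySem.List.pyGetD t2 (j : Int) 0 + a = summa by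
        rw [hsumma]; ring]
    simp only [List.foldl_cons]
    split_ifs with hc
    · rw [show PySem.List.pySetD nr (j : Int) summa
          = PySem.List.pySetD nr (j : Int) (PySem.Int.mod summa max) by rw [hc],
        hset, key, hdrop, hrhs]
      simp
    · rw [hset, key, hdrop, hrhs]
      simp

-- ===== VERDICT (by name: the statement is the Claim_ definition above) =====
theorem time_add_spec : Claim_equal_time_add := by
  intro t1 t2 max len _ hpre
  unfold Spec_time_add time_add time_add_alt
  by_cases hlen : 1 ≤ len
  · obtain ⟨hmax, h1, h2⟩ := hpre hlen
    obtain ⟨k, hk⟩ : ∃ k : Nat, len = (k : Int) := ⟨len.toNat, by omega⟩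
    subst hk
    -- A side: the carry loop fills the result list with revPass's digits
    have hA := pv_aloop t1 t2 max k 0 0 (List.replicate k 0) (by simp)
    rw [Int.toNat_natCast, hA, List.drop_replicate]
    simp only [Nat.sub_self, List.replicate_zero, List.append_nil]
    -- B side: the decode loop extracts the digits of the encoded sum
    rw [pv_decode_fold]
    simp only [List.nil_append]
    have hlenr : (PySem.List.pyRange 0 (k : Int) 1).length = k := by
      rw [PySem.List.pyRange_zero_nat]; simp
    rw [hlenr]
    have hn : (PySem.List.pyRange 0 (k : Int) 1).foldl
        (fun n i => n * max + PySem.List.pyGetD t1 i 0 + PySem.List.pyGetD t2 i 0) 0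
        = (sumsRev t1 t2 k).foldr (fun x n => n * max + x) 0 + 0 := by
      unfold sumsRev
      rw [PySem.List.pyRange_zero_nat, List.foldl_map, List.foldr_reverse, List.foldl_map,
        add_zero]
      congr 1
      funext n j
      ring
    have hmain := pv_extract_encRev max hmax (sumsRev t1 t2 k) 0
    rw [show (sumsRev t1 t2 k).length = k by simp [sumsRev]] at hmain
    rw [hn, hmain]
  · -- len ≤ 0: both loops are empty and the result list is empty
    rw [PySem.List.pyRange_neg_one_eq_nil (by omega : len - 1 ≤ (-1 : Int)),
      PySem.List.pyRange_one_eq_nil (by omega : len ≤ (0 : Int))]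
    simp [Int.toNat_of_nonpos (by omega : len ≤ 0)]
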